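-- pv_equiv track=rewrite | github.com/adityabalaji97/cricket-data-thing | services/fantasy_planner.py | _build_last_name_lookup
-- ===== SOURCE A (Python) =====
-- from typing import Any, Dict, List, Optional
--
-- def _last_name_key(name: Optional[str]) -> Optional[str]:
--     if not name:
--         return None
--     parts = [part for part in str(name).replace(".", " ").split() if part]
--     if not parts:
--         return None
--     return parts[-1].lower()
--
-- def _build_last_name_lookup(names: List[str]) -> Dict[str, str]:
--     grouped: Dict[str, Dict[str, str]] = {}
--     for name in names:
--         key = _last_name_key(name)
--         if not key:
--             continue
--         normalized = name.strip()
--         if not normalized: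
--             continue
--         grouped.setdefault(key, {})
--         grouped[key].setdefault(normalized.lower(), normalized)
--     return {
--         key: next(iter(value_map.values()))
--         for key, value_map in grouped.items()
--         if len(value_map) == 1
--     }
-- ===== SOURCE B (Python) =====
-- from typing import Dict, List, Optional, Tuple
--
-- def _last_name_key(name: Optional[str]) -> Optional[str]:
--     if not name:
--         return None
--     parts = [part for part in str(name).replace(".", " ").split() if part]
--     if not parts:
--         return None
--     return parts[-1].lower()
--
-- def _valid_pair(name: str) -> Optional[Tuple[str, str]]:
--     key = _last_name_key(name)
--     if not key:
--         return None
--     normalized = name.strip()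
--     if not normalized:
--         return None
--     return (key, normalized)
--
-- def _build_last_name_lookup(names: List[str]) -> Dict[str, str]:
--     pairs = [p for p in map(_valid_pair, names) if p is not None]
--     out: Dict[str, str] = {}
--     for key, normalized in pairs:
--         if key in out:
--             continue
--         lows = [n.lower() for k, n in pairs if k == key]
--         if all(l == lows[0] for l in lows):
--             out[key] = normalized
--     return out
-- ===== Notes on version B (the rewrite author's own statement) =====
-- stated objective: alternative
-- what changed: Replaces A's single-pass dict-of-dicts grouping (an inner first-seen dict per last-name key, then keeping groups of size 1) by two staged passes: first collect the flat list of valid (key, normalized) pairs, then at each key's first occurrence brute-force rescan that flat list to check whether all lowercase forms of that key agree; no grouping structure is ever built. B trades speed for this flat structure: it is quadratic in the worst case where A is linear.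
import Mathlib
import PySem

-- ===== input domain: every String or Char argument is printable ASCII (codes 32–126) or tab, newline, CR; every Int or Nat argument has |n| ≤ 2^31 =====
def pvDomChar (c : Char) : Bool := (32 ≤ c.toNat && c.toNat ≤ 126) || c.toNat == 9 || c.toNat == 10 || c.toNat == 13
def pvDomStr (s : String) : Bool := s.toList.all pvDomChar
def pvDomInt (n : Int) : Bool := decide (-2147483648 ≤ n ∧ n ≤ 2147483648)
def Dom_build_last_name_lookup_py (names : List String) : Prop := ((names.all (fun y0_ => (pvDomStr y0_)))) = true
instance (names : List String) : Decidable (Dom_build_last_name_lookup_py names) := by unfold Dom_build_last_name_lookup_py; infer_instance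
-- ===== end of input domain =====

-- B replaces A's incremental dict-of-dicts grouping by two staged passes: collect the valid (key, normalized) pairs, then for each first occurrence of a key rescan that flat list to decide whether all its lowercase forms agree (alternative decomposition, brute-force rescan instead of grouping state).


-- ===== PORT A =====
-- helper _last_name_key (identical in Source A and Source B)
def pvLastNameKey (name : String) : Option String :=
  if name = "" then none
  else
    let parts := (PySem.Str.split₀ (PySem.Str.replace name "." " ")).filter (fun p => decide (p ≠ ""))
    if parts = [] then none
    else (PySem.List.pyGet? parts (-1)).map PySem.Str.lower

-- loop body of A's 'for name in names'
def pvStepA (g : PySem.Dict String (PySem.Dict String String)) (name : String) :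
    PySem.Dict String (PySem.Dict String String) :=
  match pvLastNameKey name with
  | none => g
  | some key =>
    if key = "" then g
    else
      let normalized := PySem.Str.strip name
      if normalized = "" then g
      else
        let g1 := g.setdefault key PySem.Dict.empty
        g1.insert key ((g1.getD key PySem.Dict.empty).setdefault (PySem.Str.lower normalized) normalized)

def build_last_name_lookup_py (names : List String) : List (String × String) :=
  let grouped := names.foldl pvStepA PySem.Dict.empty
  grouped.items.filterMap (fun kv =>
    if kv.2.size = 1 then some (kv.1, kv.2.values.headD "") else none)

-- ===== PORT B =====
-- helper _valid_pair of Source B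
def pvValidPair (name : String) : Option (String × String) :=
  match pvLastNameKey name with
  | none => none
  | some key =>
    if key = "" then none
    else
      let normalized := PySem.Str.strip name
      if normalized = "" then none
      else some (key, normalized)

-- loop body of B's 'for key, normalized in pairs' (pairs is the full staged list)
def pvStepB (pairs : List (String × String)) (out : PySem.Dict String String)
    (p : String × String) : PySem.Dict String String :=
  if out.contains p.1 then out
  else
    let lows := (pairs.filter (fun q => q.1 == p.1)).map (fun q => PySem.Str.lower q.2)
    if lows.all (fun l => l == lows.headD "") then out.insert p.1 p.2 else out

def build_last_name_lookup_py_alt (names : List String) : List (String × String) :=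
  let pairs := names.filterMap pvValidPair
  (pairs.foldl (pvStepB pairs) PySem.Dict.empty).items

-- ===== PRECONDITION & SPEC =====
def Spec_build_last_name_lookup_py (names : List String) (out : List (String × String)) : Prop := out = build_last_name_lookup_py_alt names
instance (names : List String) (out : List (String × String)) : Decidable (Spec_build_last_name_lookup_py names out) := by unfold Spec_build_last_name_lookup_py; infer_instance

-- ===== CLAIM (what is proved, stated in full; the proofs are below) =====
def Claim_equal_build_last_name_lookup_py : Prop := ∀ (names : List String), Dom_build_last_name_lookup_py names → Spec_build_last_name_lookup_py names (build_last_name_lookup_py names)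

-- ===== LEMMAS AND PROOFS =====

-- A's loop body, re-expressed through B's helper pvValidPair (same guards, same values)
def pvStepP (g : PySem.Dict String (PySem.Dict String String)) (p : String × String) :
    PySem.Dict String (PySem.Dict String String) :=
  let g1 := g.setdefault p.1 PySem.Dict.empty
  g1.insert p.1 ((g1.getD p.1 PySem.Dict.empty).setdefault (PySem.Str.lower p.2) p.2)

theorem pvStepA_eq (g : PySem.Dict String (PySem.Dict String String)) (name : String) :
    pvStepA g name = match pvValidPair name with
      | none => g
      | some p => pvStepP g p := by
  unfold pvStepA pvValidPair pvStepP
  cases pvLastNameKey name with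
  | none => rfl
  | some key =>
    by_cases hk : key = ""
    · simp [hk]
    · by_cases hs : PySem.Str.strip name = "" <;> simp [hk, hs]

theorem pvFoldA_eq (names : List String) (g : PySem.Dict String (PySem.Dict String String)) :
    names.foldl pvStepA g = (names.filterMap pvValidPair).foldl pvStepP g := by
  induction names generalizing g with
  | nil => rfl
  | cons n t ih =>
    simp only [List.foldl_cons, List.filterMap_cons, pvStepA_eq]
    cases pvValidPair n with
    | none => exact ih g
    | some p => simp only [List.foldl_cons]; exact ih _

-- first pair per key, in first-occurrence order
def pvFirsts : List (String × String) → List (String × String)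
  | [] => []
  | q :: t => q :: (pvFirsts t).filter (fun r => decide (r.1 ≠ q.1))

-- the inner value-map of A's grouped[k], as an items list
def pvInner (l : List (String × String)) (k : String) : List (String × String) :=
  pvFirsts ((l.filter (fun q => q.1 == k)).map (fun q => (PySem.Str.lower q.2, q.2)))

-- B's survival test for a key (exactly the condition pvStepB evaluates)
def pvKeep (l : List (String × String)) (k : String) : Bool :=
  let lows := (l.filter (fun q => q.1 == k)).map (fun q => PySem.Str.lower q.2)
  lows.all (fun x => x == lows.headD "")

theorem pvFirsts_mem_fst (l : List (String × String)) (a : String) :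
    a ∈ (pvFirsts l).map Prod.fst ↔ a ∈ l.map Prod.fst := by
  induction l with
  | nil => rfl
  | cons q t ih =>
    simp only [pvFirsts, List.map_cons, List.mem_cons]
    by_cases ha : a = q.1
    · simp [ha]
    · simp only [ha, false_or]
      rw [← ih]
      simp only [List.mem_map, List.mem_filter]
      constructor
      · rintro ⟨r, ⟨hr, _⟩, rfl⟩; exact ⟨r, hr, rfl⟩
      · rintro ⟨r, hr, rfl⟩; exact ⟨r, ⟨hr, by simpa using ha⟩, rfl⟩

theorem pvFirsts_nodup_fst (l : List (String × String)) :
    ((pvFirsts l).map Prod.fst).Nodup := by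
  induction l with
  | nil => exact List.nodup_nil
  | cons q t ih =>
    simp only [pvFirsts, List.map_cons, List.nodup_cons]
    constructor
    · intro hmem
      rcases List.mem_map.1 hmem with ⟨r, hr, hra⟩
      rcases List.mem_filter.1 hr with ⟨_, hne⟩
      have : r.1 ≠ q.1 := by simpa using hne
      exact this hra
    · exact List.Nodup.sublist (List.Sublist.map _ List.filter_sublist) ih

theorem pvFirsts_append_singleton (l : List (String × String)) (p : String × String) :
    pvFirsts (l ++ [p]) = pvFirsts l ++ (if p.1 ∈ l.map Prod.fst then [] else [p]) := by
  induction l with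
  | nil => simp [pvFirsts]
  | cons q t ih =>
    simp only [List.cons_append, pvFirsts, ih, List.filter_append, List.map_cons, List.mem_cons]
    by_cases hp : p.1 = q.1
    · simp [hp]
    · by_cases hm : p.1 ∈ t.map Prod.fst
      · simp [hp, hm]
      · simp [hp, hm]

theorem pvFirsts_head_filter (l : List (String × String)) (q : String × String)
    (h : q ∈ pvFirsts l) : ∃ t, l.filter (fun r => r.1 == q.1) = q :: t := by
  induction l with
  | nil => cases h
  | cons x t ih =>
    simp only [pvFirsts, List.mem_cons] at h
    rcases h with rfl | h
    · exact ⟨t.filter (fun r => r.1 == q.1), by simp⟩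
    · rcases List.mem_filter.1 h with ⟨hmem, hne⟩
      have hne2 : q.1 ≠ x.1 := by simpa using hne
      have hne' : x.1 ≠ q.1 := fun hx => hne2 hx.symm
      rcases ih hmem with ⟨t', ht'⟩
      exact ⟨t', by simp [hne', ht']⟩

-- the invariant tying A's grouped dict and B's out dict to the processed prefix
def pvInv (pairs pre : List (String × String))
    (g : PySem.Dict String (PySem.Dict String String)) (out : PySem.Dict String String) : Prop :=
  g.items.map (fun kv => (kv.1, kv.2.items)) = (pvFirsts pre).map (fun q => (q.1, pvInner pre q.1)) ∧
  out.items = (pvFirsts pre).filterMap (fun q => if pvKeep pairs q.1 then some q else none)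

theorem pvInner_append_ne (l : List (String × String)) (p : String × String) (k : String)
    (hne : k ≠ p.1) : pvInner (l ++ [p]) k = pvInner l k := by
  unfold pvInner
  rw [List.filter_append]
  have hne' : p.1 ≠ k := fun hx => hne hx.symm
  have : [p].filter (fun q => q.1 == k) = [] := by simp [hne']
  rw [this, List.append_nil]

theorem pvInner_append_self (l : List (String × String)) (p : String × String) :
    pvInner (l ++ [p]) p.1 = pvInner l p.1 ++
      (if PySem.Str.lower p.2 ∈ (pvInner l p.1).map Prod.fst then []
       else [(PySem.Str.lower p.2, p.2)]) := by
  unfold pvInner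
  rw [List.filter_append]
  have h1 : [p].filter (fun q => q.1 == p.1) = [p] := by simp
  rw [h1, List.map_append, List.map_singleton, pvFirsts_append_singleton]
  congr 1
  exact if_congr ((pvFirsts_mem_fst _ _).symm) rfl rfl

theorem pvStep_inv (pairs pre : List (String × String)) (p : String × String)
    (g : PySem.Dict String (PySem.Dict String String)) (out : PySem.Dict String String)
    (h : pvInv pairs pre g out) :
    pvInv pairs (pre ++ [p]) (pvStepP g p) (pvStepB pairs out p) := by
  obtain ⟨h1, h2⟩ := h
  have hgfst : g.items.map Prod.fst = (pvFirsts pre).map Prod.fst := by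
    have := congrArg (List.map Prod.fst) h1
    simpa [List.map_map, Function.comp] using this
  have hknodup : g.keys.Nodup := by
    show (g.items.map _).Nodup
    rw [hgfst]
    exact pvFirsts_nodup_fst pre
  have hgc : g.contains p.1 = true ↔ p.1 ∈ pre.map Prod.fst := by
    rw [PySem.Dict.contains_iff_mem_keys]
    show p.1 ∈ g.items.map Prod.fst ↔ _
    rw [hgfst, pvFirsts_mem_fst]
  have houtmem : ∀ r, r ∈ out.items ↔ ∃ q ∈ pvFirsts pre, pvKeep pairs q.1 = true ∧ q = r := by
    intro r
    rw [h2]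
    simp only [List.mem_filterMap]
    constructor
    · rintro ⟨q, hq, hfq⟩
      by_cases hk : pvKeep pairs q.1 = true
      · rw [if_pos hk] at hfq
        exact ⟨q, hq, hk, Option.some.inj hfq⟩
      · rw [if_neg hk] at hfq
        cases hfq
    · rintro ⟨q, hq, hk, rfl⟩
      exact ⟨q, hq, by rw [if_pos hk]⟩
  have houtc : out.contains p.1 = true ↔ (p.1 ∈ pre.map Prod.fst ∧ pvKeep pairs p.1 = true) := by
    rw [PySem.Dict.contains_iff_mem_keys]
    show p.1 ∈ out.items.map Prod.fst ↔ _
    constructor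
    · intro hmem
      rcases List.mem_map.1 hmem with ⟨r, hr, hr1⟩
      rcases (houtmem r).1 hr with ⟨q, hq, hkq, rfl⟩
      refine ⟨hr1 ▸ ((pvFirsts_mem_fst pre q.1).1 (List.mem_map_of_mem hq)), hr1 ▸ hkq⟩
    · rintro ⟨hmem, hk⟩
      rcases List.mem_map.1 ((pvFirsts_mem_fst pre p.1).2 hmem) with ⟨q, hq, hq1⟩
      exact List.mem_map.2 ⟨q, (houtmem q).2 ⟨q, hq, by rw [hq1]; exact hk, rfl⟩, hq1⟩
  have hstepB : pvStepB pairs out p =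
      if out.contains p.1 then out
      else (if pvKeep pairs p.1 then out.insert p.1 p.2 else out) := rfl
  constructor
  · -- A-side component
    by_cases hm : p.1 ∈ pre.map Prod.fst
    · have hgc' : g.contains p.1 = true := hgc.2 hm
      have hexists : p.1 ∈ g.items.map Prod.fst := by
        rw [hgfst, pvFirsts_mem_fst]; exact hm
      rcases List.mem_map.1 hexists with ⟨⟨k0, vm⟩, hkv, hkv1⟩
      dsimp at hkv1
      subst hkv1
      have hvmitems : vm.items = pvInner pre p.1 := by
        have hmemF : ((p.1 : String), vm.items) ∈ (pvFirsts pre).map (fun q => (q.1, pvInner pre q.1)) := by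
          rw [← h1]
          exact List.mem_map.2 ⟨(p.1, vm), hkv, rfl⟩
        rcases List.mem_map.1 hmemF with ⟨q, hq, hqe⟩
        rw [Prod.ext_iff] at hqe
        obtain ⟨e1, e2⟩ := hqe
        dsimp at e1 e2
        rw [← e2, e1]
      have hgetD : g.getD p.1 PySem.Dict.empty = vm :=
        PySem.Dict.getD_of_mem_items g hkv hknodup PySem.Dict.empty
      have hset : g.setdefault p.1 PySem.Dict.empty = g :=
        PySem.Dict.setdefault_of_contains g PySem.Dict.empty hgc'
      show ((g.setdefault p.1 PySem.Dict.empty).insert p.1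
          (((g.setdefault p.1 PySem.Dict.empty).getD p.1 PySem.Dict.empty).setdefault
            (PySem.Str.lower p.2) p.2)).items.map _ = _
      rw [hset, hgetD, PySem.Dict.items_insert_of_contains g _ hgc']
      rw [List.map_map, pvFirsts_append_singleton, if_pos hm, List.append_nil]
      have hcomp : g.items.map ((fun kv => (kv.1, kv.2.items)) ∘
            (fun r => if r.1 == p.1 then (p.1, vm.setdefault (PySem.Str.lower p.2) p.2) else r))
          = (g.items.map (fun kv => (kv.1, kv.2.items))).map
            (fun kl => if kl.1 == p.1 then (p.1, (vm.setdefault (PySem.Str.lower p.2) p.2).items) else kl) := by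
        rw [List.map_map]
        apply List.map_congr_left
        intro r _
        by_cases hre : r.1 == p.1 <;> simp [Function.comp, hre]
      rw [hcomp, h1, List.map_map]
      apply List.map_congr_left
      intro q hq
      have hsd : (vm.setdefault (PySem.Str.lower p.2) p.2).items = pvInner (pre ++ [p]) p.1 := by
        rw [pvInner_append_self]
        by_cases hcl : vm.contains (PySem.Str.lower p.2) = true
        · have hmemlow : PySem.Str.lower p.2 ∈ (pvInner pre p.1).map Prod.fst := by
            rw [← hvmitems]
            have := (PySem.Dict.contains_iff_mem_keys vm (PySem.Str.lower p.2)).1 hcl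
            exact this
          rw [PySem.Dict.setdefault_of_contains vm p.2 hcl, hvmitems, if_pos hmemlow, List.append_nil]
        · have hcl' : vm.contains (PySem.Str.lower p.2) = false := by simpa using hcl
          have hnotmem : PySem.Str.lower p.2 ∉ (pvInner pre p.1).map Prod.fst := by
            rw [← hvmitems]
            intro hmm
            rw [(PySem.Dict.contains_iff_mem_keys vm (PySem.Str.lower p.2)).2 hmm] at hcl'
            cases hcl'
          rw [PySem.Dict.setdefault_of_not_contains vm p.2 hcl',
            PySem.Dict.items_insert_of_not_contains vm p.2 hcl', hvmitems, if_neg hnotmem]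
      by_cases hqe : q.1 = p.1
      · simp only [Function.comp, hqe, BEq.rfl, if_true]
        rw [hsd]
      · have hqe' : (q.1 == p.1) = false := by simpa using hqe
        simp only [Function.comp, hqe', Bool.false_eq_true, if_false]
        rw [pvInner_append_ne pre p q.1 hqe]
    · have hgc' : g.contains p.1 = false := by
        cases hx : g.contains p.1
        · rfl
        · exact absurd (hgc.1 hx) hm
      show ((g.setdefault p.1 PySem.Dict.empty).insert p.1
          (((g.setdefault p.1 PySem.Dict.empty).getD p.1 PySem.Dict.empty).setdefault
            (PySem.Str.lower p.2) p.2)).items.map _ = _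
      rw [PySem.Dict.setdefault_of_not_contains g PySem.Dict.empty hgc',
        PySem.Dict.getD_insert_self g p.1 PySem.Dict.empty PySem.Dict.empty,
        PySem.Dict.insert_insert_self,
        PySem.Dict.items_insert_of_not_contains g _ hgc',
        List.map_append, pvFirsts_append_singleton, if_neg hm, List.map_append]
      have hfilnil : pre.filter (fun q => q.1 == p.1) = [] := by
        rw [List.filter_eq_nil_iff]
        intro r hr
        simp only [beq_eq_false_iff_ne, ne_eq, Bool.not_eq_true]
        intro he
        exact absurd (he ▸ List.mem_map_of_mem hr : (p.1 : String) ∈ pre.map Prod.fst) hm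
      have hinnew : pvInner (pre ++ [p]) p.1 = [(PySem.Str.lower p.2, p.2)] := by
        unfold pvInner
        rw [List.filter_append, hfilnil, List.nil_append]
        simp [pvFirsts]
      congr 1
      · rw [h1]
        apply List.map_congr_left
        intro q hq
        have hq1 : q.1 ≠ p.1 := by
          intro he
          exact hm (he ▸ (pvFirsts_mem_fst pre q.1).1 (List.mem_map_of_mem hq))
        rw [pvInner_append_ne pre p q.1 hq1]
      · simp only [List.map_singleton]
        rw [hinnew]
        rfl
  · -- B-side component
    rw [hstepB, pvFirsts_append_singleton, List.filterMap_append]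
    by_cases hm : p.1 ∈ pre.map Prod.fst
    · rw [if_pos hm]
      by_cases hk : pvKeep pairs p.1 = true
      · rw [if_pos (houtc.2 ⟨hm, hk⟩)]
        simpa using h2
      · have hc : out.contains p.1 = false := by
          cases hoc : out.contains p.1
          · rfl
          · exact absurd (houtc.1 hoc).2 hk
        rw [hc]
        simp only [Bool.false_eq_true, if_false, if_neg hk]
        simpa using h2
    · rw [if_neg hm]
      have hc : out.contains p.1 = false := by
        cases hoc : out.contains p.1
        · rfl
        · exact absurd (houtc.1 hoc).1 hm
      rw [hc]
      simp only [Bool.false_eq_true, if_false]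
      by_cases hk : pvKeep pairs p.1 = true
      · rw [if_pos hk, PySem.Dict.items_insert_of_not_contains out p.2 hc, h2]
        simp [hk]
      · rw [if_neg hk, h2]
        simp [hk]

theorem pvFold_inv (pairs : List (String × String)) (suf pre : List (String × String))
    (g : PySem.Dict String (PySem.Dict String String)) (out : PySem.Dict String String)
    (h : pvInv pairs pre g out) :
    pvInv pairs (pre ++ suf) (suf.foldl pvStepP g) (suf.foldl (pvStepB pairs) out) := by
  induction suf generalizing pre g out with
  | nil => simpa using h
  | cons q t ih =>
    have := ih (pre ++ [q]) _ _ (pvStep_inv pairs pre q g out h)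
    simpa [List.append_assoc] using this

-- the per-key final comparison
theorem pvPointwise (pairs : List (String × String)) (q : String × String)
    (h : q ∈ pvFirsts pairs) :
    (if (pvInner pairs q.1).length = 1 then
        some (q.1, ((pvInner pairs q.1).map Prod.snd).headD "") else none)
      = if pvKeep pairs q.1 then some q else none := by
  obtain ⟨t, ht⟩ := pvFirsts_head_filter pairs q h
  have hInner : pvInner pairs q.1
      = (PySem.Str.lower q.2, q.2) ::
        (pvFirsts (t.map (fun x => (PySem.Str.lower x.2, x.2)))).filter
          (fun r => decide (r.1 ≠ PySem.Str.lower q.2)) := by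
    unfold pvInner
    rw [ht]
    rfl
  have hC : pvKeep pairs q.1 = true ↔ ∀ x ∈ t, PySem.Str.lower x.2 = PySem.Str.lower q.2 := by
    unfold pvKeep
    rw [ht]
    simp
  have hLen : (pvInner pairs q.1).length = 1 ↔
      ∀ x ∈ t, PySem.Str.lower x.2 = PySem.Str.lower q.2 := by
    rw [hInner]
    have hstep : ∀ (m : List (String × String)), (m.length + 1 = 1) ↔ m = [] := by
      intro m; constructor
      · intro hm; exact List.length_eq_zero_iff.1 (by omega)
      · intro hm; simp [hm]
    rw [List.length_cons, hstep, List.filter_eq_nil_iff]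
    constructor
    · intro hf x hx
      by_contra hne
      have hmem : PySem.Str.lower x.2 ∈
          (pvFirsts (t.map (fun x => (PySem.Str.lower x.2, x.2)))).map Prod.fst := by
        rw [pvFirsts_mem_fst]
        simp only [List.map_map, List.mem_map]
        exact ⟨x, hx, rfl⟩
      rcases List.mem_map.1 hmem with ⟨r, hr, hr1⟩
      have := hf r hr
      simp only [decide_not, Bool.not_eq_eq_eq_not, Bool.not_true, decide_eq_false_iff_not,
        Decidable.not_not] at this
      exact hne (hr1 ▸ this)
    · intro hall r hr
      have hmem : r.1 ∈ (t.map (fun x => (PySem.Str.lower x.2, x.2))).map Prod.fst := by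
        rw [← pvFirsts_mem_fst]
        exact List.mem_map_of_mem hr
      simp only [List.map_map, List.mem_map] at hmem
      rcases hmem with ⟨x, hx, hx1⟩
      simp [← hx1, hall x hx]
  by_cases hc : ∀ x ∈ t, PySem.Str.lower x.2 = PySem.Str.lower q.2
  · rw [if_pos (hLen.2 hc), if_pos (hC.2 hc)]
    have hnil : (pvFirsts (t.map (fun x => (PySem.Str.lower x.2, x.2)))).filter
        (fun r => decide (r.1 ≠ PySem.Str.lower q.2)) = [] := by
      have h1 : (pvInner pairs q.1).length = 1 := hLen.2 hc
      rw [hInner] at h1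
      simpa using h1
    rw [hInner, hnil]
    rfl
  · rw [if_neg (fun h1 => hc (hLen.1 h1)), if_neg (by simpa [hC] using hc)]

-- ===== VERDICT (by name: the statement is the Claim_ definition above) =====
theorem build_last_name_lookup_py_spec : Claim_equal_build_last_name_lookup_py := by
  intro names _
  unfold Spec_build_last_name_lookup_py build_last_name_lookup_py build_last_name_lookup_py_alt
  rw [pvFoldA_eq]
  set pairs := names.filterMap pvValidPair with hp
  obtain ⟨h1, h2⟩ := pvFold_inv pairs pairs [] PySem.Dict.empty PySem.Dict.empty ⟨rfl, rfl⟩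
  simp only [List.nil_append] at h1 h2
  rw [h2]
  have hfac : (pairs.foldl pvStepP PySem.Dict.empty).items.filterMap
        (fun kv => if kv.2.size = 1 then some (kv.1, kv.2.values.headD "") else none)
      = ((pairs.foldl pvStepP PySem.Dict.empty).items.map (fun kv => (kv.1, kv.2.items))).filterMap
        (fun kl => if kl.2.length = 1 then some (kl.1, (kl.2.map Prod.snd).headD "") else none) := by
    rw [List.filterMap_map]
    rfl
  rw [hfac, h1, List.filterMap_map]
  apply List.filterMap_congr
  intro q hq
  exact pvPointwise pairs q hq
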